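-- pv_equiv track=rewrite | github.com/Untuxed/HockeyBot | utils/genericFunctions.py | get_pending
-- ===== SOURCE A (Python) =====
-- def get_pending(attendees, maybes, nos, rosters):
--     responded = attendees + maybes + nos
--
--     popped_rosters = []
--
--     for index, name in enumerate(rosters):
--         if name in responded or name + ' ' + '[A]' in responded or name + ' ' + '[C]' in responded:
--             continue
--         else:
--             popped_rosters.append(name)
--
--     return popped_rosters
-- ===== SOURCE B (Python) =====
-- def get_pending(attendees, maybes, nos, rosters):
--     covered = set()
--     for r in attendees + maybes + nos:
--         covered.add(r)
--         if r.endswith(' [A]') or r.endswith(' [C]'):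
--             covered.add(r[:-4])
--     return [name for name in rosters if name not in covered]
-- ===== Notes on version B (the rewrite author's own statement) =====
-- stated objective: faster
-- what changed: Instead of scanning the responded list three times per roster name (with two string concatenations each), B makes one pass over the responded list building a hash set that also records the base name of every ' [A]'/' [C]'-suffixed entry, then filters rosters with a single set lookup per name.
import Mathlib
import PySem

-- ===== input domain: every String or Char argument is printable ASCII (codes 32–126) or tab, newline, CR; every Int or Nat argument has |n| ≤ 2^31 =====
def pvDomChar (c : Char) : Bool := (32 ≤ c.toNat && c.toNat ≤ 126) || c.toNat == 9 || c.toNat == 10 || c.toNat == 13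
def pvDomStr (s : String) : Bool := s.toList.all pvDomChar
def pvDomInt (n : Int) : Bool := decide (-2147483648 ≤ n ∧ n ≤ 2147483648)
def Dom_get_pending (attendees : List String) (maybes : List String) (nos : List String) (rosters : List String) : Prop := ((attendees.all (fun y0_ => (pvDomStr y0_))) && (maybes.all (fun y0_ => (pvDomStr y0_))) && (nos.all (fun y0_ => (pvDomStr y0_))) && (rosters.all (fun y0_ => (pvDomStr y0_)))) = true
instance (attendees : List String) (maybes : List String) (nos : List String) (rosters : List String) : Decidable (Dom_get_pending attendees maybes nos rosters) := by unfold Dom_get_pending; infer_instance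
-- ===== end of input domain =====

-- B replaces A's three membership scans of `responded` per roster name by one covered-set
-- built in a single pass over `responded` (recording each entry and, for ' [A]'/' [C]'-suffixed
-- entries, also the base name), then a single lookup per roster name; proved equal on Dom.

-- Python's '+' on strings, exact (kept on the List Char side so the kernel can unfold it)
def pvCat (a b : String) : String := String.ofList (a.toList ++ b.toList)

-- ===== PORT A =====
def get_pending (attendees : List String) (maybes : List String) (nos : List String) (rosters : List String) : List String :=
  let responded := attendees ++ maybes ++ nos
  rosters.foldl (fun acc name =>
    if responded.contains name
        || responded.contains (pvCat (pvCat name " ") "[A]")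
        || responded.contains (pvCat (pvCat name " ") "[C]")
    then acc
    else acc ++ [name]) []

-- ===== PORT B =====
-- one pass over responded: every entry, plus the base name of ' [A]'/' [C]'-suffixed entries
def pvCovered (responded : List String) : PySem.Set String :=
  responded.foldl (fun s r =>
    let s' := PySem.Set.add s r
    if PySem.Str.endswith r " [A]" || PySem.Str.endswith r " [C]"
    then PySem.Set.add s' (PySem.Str.slice r none (some (-4)))
    else s') PySem.Set.empty

def get_pending_alt (attendees : List String) (maybes : List String) (nos : List String) (rosters : List String) : List String :=
  let covered := pvCovered (attendees ++ maybes ++ nos)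
  rosters.filter (fun name => !(PySem.Set.contains covered name))

-- ===== PRECONDITION & SPEC =====
def Spec_get_pending (attendees : List String) (maybes : List String) (nos : List String) (rosters : List String) (out : List String) : Prop := out = get_pending_alt attendees maybes nos rosters
instance (attendees : List String) (maybes : List String) (nos : List String) (rosters : List String) (out : List String) : Decidable (Spec_get_pending attendees maybes nos rosters out) := by unfold Spec_get_pending; infer_instance

-- ===== CLAIM (what is proved, stated in full; the proofs are below) =====
def Claim_equal_get_pending : Prop := ∀ (attendees : List String) (maybes : List String) (nos : List String) (rosters : List String), Dom_get_pending attendees maybes nos rosters → Spec_get_pending attendees maybes nos rosters (get_pending attendees maybes nos rosters)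

-- ===== LEMMAS AND PROOFS =====

theorem pvTagA_toList (x : String) :
    (pvCat (pvCat x " ") "[A]").toList = x.toList ++ [' ', '[', 'A', ']'] := by
  simp [pvCat]

theorem pvTagC_toList (x : String) :
    (pvCat (pvCat x " ") "[C]").toList = x.toList ++ [' ', '[', 'C', ']'] := by
  simp [pvCat]

theorem pvSliceM4_toList (r : String) :
    (PySem.Str.slice r none (some (-4))).toList = r.toList.take (r.toList.length - 4) := by
  simp [PySem.Str.slice]
  rw [PySem.List.slice_to_neg_ofNat r.toList 4 (by omega)]
  rw [String.length_toList]

-- r ends with tag (4 chars) → r = (r[:-4]) ++ tag, stated through pvCat/slice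
theorem pvRebuild (r x : String) (tag : List Char) (hlen : tag.length = 4)
    (hsuf : tag <:+ r.toList)
    (hx : x = PySem.Str.slice r none (some (-4))) :
    x.toList ++ tag = r.toList := by
  obtain ⟨u, hu⟩ := hsuf
  subst hx
  rw [pvSliceM4_toList, ← hu]
  simp [hlen]

-- membership in the covered set after the fold
theorem pvMem_covered_foldl (rs : List String) (s : PySem.Set String) (x : String) :
    x ∈ rs.foldl (fun s r =>
      let s' := PySem.Set.add s r
      if PySem.Str.endswith r " [A]" || PySem.Str.endswith r " [C]"
      then PySem.Set.add s' (PySem.Str.slice r none (some (-4)))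
      else s') s
    ↔ x ∈ s ∨ ∃ r ∈ rs, x = r ∨
        ((PySem.Str.endswith r " [A]" || PySem.Str.endswith r " [C]") = true
          ∧ x = PySem.Str.slice r none (some (-4))) := by
  induction rs generalizing s with
  | nil => simp
  | cons r rs ih =>
    simp only [List.foldl_cons, ih]
    by_cases h : (PySem.Str.endswith r " [A]" || PySem.Str.endswith r " [C]") = true
    · simp only [h, if_pos]
      rw [PySem.Set.mem_add, PySem.Set.mem_add]
      constructor
      · rintro (((hs | hx) | hx) | ⟨r', hr', hc⟩)
        · exact Or.inl hs
        · exact Or.inr ⟨r, by simp, Or.inl hx⟩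
        · exact Or.inr ⟨r, by simp, Or.inr ⟨h, hx⟩⟩
        · exact Or.inr ⟨r', by simp [hr'], hc⟩
      · rintro (hs | ⟨r', hr', hc⟩)
        · exact Or.inl (Or.inl (Or.inl hs))
        · rcases List.mem_cons.mp hr' with heq | hmem
          · subst heq
            rcases hc with hx | ⟨_, hx⟩
            · exact Or.inl (Or.inl (Or.inr hx))
            · exact Or.inl (Or.inr hx)
          · exact Or.inr ⟨r', hmem, hc⟩
    · simp only [h, if_neg, Bool.false_eq_true, not_false_iff]
      rw [PySem.Set.mem_add]
      constructor
      · rintro ((hs | hx) | ⟨r', hr', hc⟩)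
        · exact Or.inl hs
        · exact Or.inr ⟨r, by simp, Or.inl hx⟩
        · exact Or.inr ⟨r', by simp [hr'], hc⟩
      · rintro (hs | ⟨r', hr', hc⟩)
        · exact Or.inl (Or.inl hs)
        · rcases List.mem_cons.mp hr' with heq | hmem
          · subst heq
            rcases hc with hx | ⟨he, _⟩
            · exact Or.inl (Or.inr hx)
            · exact absurd he h
          · exact Or.inr ⟨r', hmem, hc⟩

-- the covered set holds exactly the names A's three membership tests would find
theorem pvMem_covered (responded : List String) (x : String) :
    x ∈ pvCovered responded
    ↔ (x ∈ responded ∨ pvCat (pvCat x " ") "[A]" ∈ responded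
        ∨ pvCat (pvCat x " ") "[C]" ∈ responded) := by
  unfold pvCovered
  rw [pvMem_covered_foldl]
  simp only [PySem.Set.empty, List.not_mem_nil, false_or]
  constructor
  · rintro ⟨r, hr, hx | ⟨he, hx⟩⟩
    · exact Or.inl (hx ▸ hr)
    · rcases Bool.or_eq_true_iff.mp he with hA | hC
      · refine Or.inr (Or.inl ?_)
        have : (pvCat (pvCat x " ") "[A]") = r := by
          apply String.toList_inj.mp
          rw [pvTagA_toList]
          exact pvRebuild r x [' ', '[', 'A', ']'] rfl
            ((PySem.Chars.endswith_iff _ _).mp (by simpa using hA)) hx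
        exact this ▸ hr
      · refine Or.inr (Or.inr ?_)
        have : (pvCat (pvCat x " ") "[C]") = r := by
          apply String.toList_inj.mp
          rw [pvTagC_toList]
          exact pvRebuild r x [' ', '[', 'C', ']'] rfl
            ((PySem.Chars.endswith_iff _ _).mp (by simpa using hC)) hx
        exact this ▸ hr
  · rintro (hx | hx | hx)
    · exact ⟨x, hx, Or.inl rfl⟩
    · refine ⟨_, hx, Or.inr ⟨?_, ?_⟩⟩
      · apply Bool.or_eq_true_iff.mpr
        left
        rw [PySem.Str.endswith_eq]
        apply (PySem.Chars.endswith_iff _ _).mpr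
        rw [pvTagA_toList]
        exact List.suffix_append x.toList _
      · apply String.toList_inj.mp
        rw [pvSliceM4_toList, pvTagA_toList]
        simp
    · refine ⟨_, hx, Or.inr ⟨?_, ?_⟩⟩
      · apply Bool.or_eq_true_iff.mpr
        right
        rw [PySem.Str.endswith_eq]
        apply (PySem.Chars.endswith_iff _ _).mpr
        rw [pvTagC_toList]
        exact List.suffix_append x.toList _
      · apply String.toList_inj.mp
        rw [pvSliceM4_toList, pvTagC_toList]
        simp

-- A's skip-or-append fold is an append of a filter
theorem pvFoldl_skip {α : Type} (p : α → Bool) (l : List α) (acc : List α) :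
    l.foldl (fun acc x => if p x then acc else acc ++ [x]) acc
      = acc ++ l.filter (fun x => !p x) := by
  induction l generalizing acc with
  | nil => simp
  | cons x xs ih =>
    by_cases h : p x <;> simp [List.foldl_cons, h, ih]

-- ===== VERDICT (by name: the statement is the Claim_ definition above) =====
set_option maxHeartbeats 1000000 in
theorem get_pending_spec : Claim_equal_get_pending := by
  intro attendees maybes nos rosters _
  unfold Spec_get_pending get_pending get_pending_alt
  rw [pvFoldl_skip]
  simp only [List.nil_append]
  apply List.filter_congr
  intro name _
  have h : ((attendees ++ maybes ++ nos).contains name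
        || (attendees ++ maybes ++ nos).contains (pvCat (pvCat name " ") "[A]")
        || (attendees ++ maybes ++ nos).contains (pvCat (pvCat name " ") "[C]"))
      = PySem.Set.contains (pvCovered (attendees ++ maybes ++ nos)) name := by
    rw [Bool.eq_iff_iff, PySem.Set.contains_iff, pvMem_covered]
    simp only [Bool.or_eq_true, List.contains_iff_mem]
    tauto
  rw [h]
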